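-- pv_equiv track=rewrite | github.com/va64doman/codility | Challenges/bugWarsTheLastHope.py | refueling
-- ===== SOURCE A (Python) =====
-- def refueling(A, X):
--     def updateFuel(i, j, fuelBefore, distance, newFuel):
--         if (fuelBefore >= distance):
--             fuel[i][j] = max(fuel[i][j], fuelBefore - distance + newFuel)
--         pass
--     R = 1
--     N = len(A)
--     fuel = [[-1 for j in range(N)] for i in range(N)]
--     for i in range(N): fuel[i][i] = A[i]
--
--     for i in range(N - 2, -1, -1):
--         for j in range(i + 1, N):
--             updateFuel(i, j, fuel[i][j - 1], X[j] - X[j - 1], A[j])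
--             updateFuel(i, j, fuel[j - 1][i], X[j] - X[i], A[j])
--             updateFuel(j, i, fuel[j][i + 1], X[i + 1] - X[i], A[i])
--             updateFuel(j, i, fuel[i + 1][j], X[j] - X[i], A[i])
--             if fuel[i][j] >= 0 or fuel[j][i] >= 0:
--                 R = max(R, j-i+1)
--     return R
--     pass
-- ===== SOURCE B (Python) =====
-- def refueling(A, X):
--     # Top-down memoized interval recursion instead of A's bottom-up table; result is
--     # max(1, all reachable interval lengths) taken once over a flat candidate list.
--     N = len(A)
--     memo = {}
--
--     def fg(d, i):
--         # (best fuel covering [i, i+d] ending at the right end, ending at the left end)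
--         if d == 0:
--             return (A[i], A[i])
--         if (d, i) in memo:
--             return memo[(d, i)]
--         j = i + d
--         fp, gp = fg(d - 1, i)
--         fn, gn = fg(d - 1, i + 1)
--
--         def upd(cur, fb, dist, nf):
--             return max(cur, fb - dist + nf) if fb >= dist else cur
--
--         f = upd(upd(-1, fp, X[j] - X[j - 1], A[j]), gp, X[j] - X[i], A[j])
--         g = upd(upd(-1, gn, X[i + 1] - X[i], A[i]), fn, X[j] - X[i], A[i])
--         memo[(d, i)] = (f, g)
--         return (f, g)
--
--     return max([1] + [d + 1
--                       for d in range(1, N)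
--                       for i in range(N - d)
--                       if max(fg(d, i)) >= 0])
-- ===== Notes on version B (the rewrite author's own statement) =====
-- stated objective: alternative
-- what changed: Replaces A's bottom-up N×N mutable fuel table filled in a reversed double loop with a running max by a top-down memoized recursion on interval length plus a single flat max over all reachable interval lengths.
import Mathlib
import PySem

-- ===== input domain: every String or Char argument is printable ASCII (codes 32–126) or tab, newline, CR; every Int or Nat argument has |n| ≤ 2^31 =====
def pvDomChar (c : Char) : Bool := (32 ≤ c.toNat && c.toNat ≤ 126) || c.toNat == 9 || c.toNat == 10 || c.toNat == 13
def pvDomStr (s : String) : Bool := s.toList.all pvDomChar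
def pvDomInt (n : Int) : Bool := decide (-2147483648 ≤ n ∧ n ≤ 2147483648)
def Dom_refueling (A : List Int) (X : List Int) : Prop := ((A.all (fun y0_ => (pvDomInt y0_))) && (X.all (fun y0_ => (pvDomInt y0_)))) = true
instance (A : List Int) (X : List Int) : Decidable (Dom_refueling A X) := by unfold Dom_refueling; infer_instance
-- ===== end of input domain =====

-- B replaces A's bottom-up mutable N×N fuel table and running max by a top-down
-- recursion on interval length and one flat max over reachable lengths (objective: alternative).

-- ===== PORT A =====
-- the fuel table is transliterated as a function Nat → Nat → Int with pointwise update
-- (same cells, same write order as the Python list-of-lists); Python's updateFuel: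
def updF (fuel : Nat → Nat → Int) (i j : Nat) (fb dist nf : Int) : Nat → Nat → Int :=
  if fb ≥ dist then (fun a b => if a = i ∧ b = j then max (fuel i j) (fb - dist + nf) else fuel a b)
  else fuel

-- body of the inner `for j in range(i+1, N)` loop (four updateFuel calls, then the R update)
def innerBodyA (A X : List Int) (i : Nat) (st : (Nat → Nat → Int) × Int) (j : Nat) :
    (Nat → Nat → Int) × Int :=
  let f1 := updF st.1 i j (st.1 i (j-1)) (X.getD j 0 - X.getD (j-1) 0) (A.getD j 0)
  let f2 := updF f1 i j (f1 (j-1) i) (X.getD j 0 - X.getD i 0) (A.getD j 0)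
  let f3 := updF f2 j i (f2 j (i+1)) (X.getD (i+1) 0 - X.getD i 0) (A.getD i 0)
  let f4 := updF f3 j i (f3 (i+1) j) (X.getD j 0 - X.getD i 0) (A.getD i 0)
  (f4, if f4 i j ≥ 0 ∨ f4 j i ≥ 0 then max st.2 ((j:Int) - (i:Int) + 1) else st.2)

-- body of the outer `for i in range(N-2, -1, -1)` loop
def outerBodyA (A X : List Int) (st : (Nat → Nat → Int) × Int) (i : Nat) :
    (Nat → Nat → Int) × Int :=
  (List.range' (i+1) (A.length - i - 1)).foldl (innerBodyA A X i) st

def refueling (A : List Int) (X : List Int) : Int :=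
  let N := A.length
  -- fuel = [[-1 …] …]; for i in range(N): fuel[i][i] = A[i]
  let fuel0 : Nat → Nat → Int := fun a b => if a = b ∧ a < N then A.getD a 0 else -1
  -- range(N-2,-1,-1) = [N-2, …, 0]; all Python indices are in range here, so getD is exact
  (((List.range' 0 (N-1)).reverse).foldl (outerBodyA A X) (fuel0, 1)).2

-- ===== PORT B =====
-- Source B's upd
def updB (cur fb dist nf : Int) : Int := if fb ≥ dist then max cur (fb - dist + nf) else cur

-- Source B's fg(d, i) = (best fuel covering [i,i+d] ending right, ending left);
-- the Python memo dict is pure caching, ported as the same recursion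
def fgB (A X : List Int) : Nat → Nat → Int × Int
  | 0, i => (A.getD i 0, A.getD i 0)
  | d+1, i =>
    let j := i + d + 1
    let p := fgB A X d i
    let q := fgB A X d (i+1)
    (updB (updB (-1) p.1 (X.getD j 0 - X.getD (j-1) 0) (A.getD j 0)) p.2 (X.getD j 0 - X.getD i 0) (A.getD j 0),
     updB (updB (-1) q.2 (X.getD (i+1) 0 - X.getD i 0) (A.getD i 0)) q.1 (X.getD j 0 - X.getD i 0) (A.getD i 0))

-- max([1] + [d+1 for d in range(1,N) for i in range(N-d) if max(fg(d,i)) >= 0])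
def refueling_alt (A : List Int) (X : List Int) : Int :=
  let N := A.length
  ((List.range' 1 (N-1)).flatMap (fun d =>
    (List.range (N - d)).filterMap (fun i =>
      if max (fgB A X d i).1 (fgB A X d i).2 ≥ 0 then some ((d:Int) + 1) else none))).foldl max 1

-- ===== PRECONDITION & SPEC =====
-- Python A reads X[j] for every j < len(A) once len(A) ≥ 2; with len(X) < len(A) it
-- raises IndexError (as does B), so exactly those inputs are excluded.
def Pre_refueling (A : List Int) (X : List Int) : Prop := A.length ≤ 1 ∨ A.length ≤ X.length
instance (A : List Int) (X : List Int) : Decidable (Pre_refueling A X) := by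
  unfold Pre_refueling; infer_instance

def pvWitness_refueling : List Int × List Int := ([2, 0, 3], [0, 1, 5])

def Spec_refueling (A : List Int) (X : List Int) (out : Int) : Prop := out = refueling_alt A X
instance (A : List Int) (X : List Int) (out : Int) : Decidable (Spec_refueling A X out) := by
  unfold Spec_refueling; infer_instance

-- ===== CLAIM (what is proved, stated in full; the proofs are below) =====
def Claim_equal_refueling : Prop := ∀ (A : List Int) (X : List Int),
  Dom_refueling A X → Pre_refueling A X → Spec_refueling A X (refueling A X)

-- ===== LEMMAS AND PROOFS =====

-- pair (i, i+d) is "reachable" when either orientation ends with nonnegative fuel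
def reachB (A X : List Int) (d i : Nat) : Prop := (fgB A X d i).1 ≥ 0 ∨ (fgB A X d i).2 ≥ 0

-- pairs already filled once the outer loop has processed every index ≥ m
def doneO (N m lo hi : Nat) : Prop := lo < hi ∧ hi < N ∧ m ≤ lo
-- pairs filled while the outer loop is at i and the inner loop has processed j ≤ jj
def doneJ (N i jj lo hi : Nat) : Prop := lo < hi ∧ hi < N ∧ (i + 1 ≤ lo ∨ (lo = i ∧ hi ≤ jj))

-- the loop invariant: done cells agree with B's recursion, the rest are untouched,
-- and R is exactly max(1, lengths of the done reachable pairs)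
def InvA (A X : List Int) (don : Nat → Nat → Prop) (st : (Nat → Nat → Int) × Int) : Prop :=
  (∀ a : Nat, st.1 a a = (if a < A.length then A.getD a 0 else -1)) ∧
  (∀ lo hi : Nat, don lo hi →
      st.1 lo hi = (fgB A X (hi - lo) lo).1 ∧ st.1 hi lo = (fgB A X (hi - lo) lo).2) ∧
  (∀ a b : Nat, a ≠ b → ¬ don (min a b) (max a b) → st.1 a b = -1) ∧
  (st.2 = 1 ∨ ∃ lo hi, don lo hi ∧ reachB A X (hi - lo) lo ∧ st.2 = (hi:Int) - (lo:Int) + 1) ∧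
  (∀ lo hi : Nat, don lo hi → reachB A X (hi - lo) lo → (hi:Int) - (lo:Int) + 1 ≤ st.2) ∧
  1 ≤ st.2

lemma InvA_iff {A X : List Int} {d1 d2 : Nat → Nat → Prop} {st}
    (h : ∀ lo hi, d1 lo hi ↔ d2 lo hi) : InvA A X d1 st → InvA A X d2 st := by
  intro ⟨h1, h2, h3, h4, h5, h6⟩
  refine ⟨h1, fun lo hi hd => h2 lo hi ((h lo hi).2 hd),
    fun a b hne hnd => h3 a b hne (fun hd => hnd ((h _ _).1 hd)), ?_,
    fun lo hi hd => h5 lo hi ((h lo hi).2 hd), h6⟩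
  rcases h4 with h4 | ⟨lo, hi, hd, hr, he⟩
  · exact Or.inl h4
  · exact Or.inr ⟨lo, hi, (h lo hi).1 hd, hr, he⟩

lemma updF_ne (fuel : Nat → Nat → Int) (i j a b : Nat) (fb dist nf : Int)
    (h : ¬(a = i ∧ b = j)) : updF fuel i j fb dist nf a b = fuel a b := by
  unfold updF; split
  · simp [h]
  · rfl

lemma updF_at (fuel : Nat → Nat → Int) (i j : Nat) (fb dist nf : Int) :
    updF fuel i j fb dist nf i j = updB (fuel i j) fb dist nf := by
  unfold updF updB; split <;> simp

lemma stepA (A X : List Int) (i d : Nat) (hj : i + d + 1 < A.length)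
    (st : (Nat → Nat → Int) × Int) (h : InvA A X (doneJ A.length i (i + d)) st) :
    InvA A X (doneJ A.length i (i + d + 1)) (innerBodyA A X i st (i + d + 1)) := by
  obtain ⟨h1, h2, h3, h4, h5, h6⟩ := h
  set N := A.length with hN
  have hiN : i < N := by omega
  -- the two cells about to be written still hold -1
  have vij : st.1 i (i+d+1) = -1 := by
    apply h3 _ _ (by omega)
    unfold doneJ; omega
  have vji : st.1 (i+d+1) i = -1 := by
    apply h3 _ _ (by omega)
    unfold doneJ; omega
  -- the four cells read agree with B's recursion on the smaller intervals
  have rp1 : st.1 i (i+d) = (fgB A X d i).1 := by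
    cases d with
    | zero => simpa [fgB, hiN] using h1 i
    | succ c =>
      have := (h2 i (i+c+1) (by unfold doneJ; omega)).1
      simpa [show i+c+1-i = c+1 by omega] using this
  have rp2 : st.1 (i+d) i = (fgB A X d i).2 := by
    cases d with
    | zero => simpa [fgB, hiN] using h1 i
    | succ c =>
      have := (h2 i (i+c+1) (by unfold doneJ; omega)).2
      simpa [show i+c+1-i = c+1 by omega] using this
  have rq2 : st.1 (i+d+1) (i+1) = (fgB A X d (i+1)).2 := by
    cases d with
    | zero => simpa [fgB, show i+1 < N by omega] using h1 (i+1)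
    | succ c =>
      have := (h2 (i+1) (i+c+1+1) (by unfold doneJ; omega)).2
      simpa [show i+c+1+1-(i+1) = c+1 by omega] using this
  have rq1 : st.1 (i+1) (i+d+1) = (fgB A X d (i+1)).1 := by
    cases d with
    | zero => simpa [fgB, show i+1 < N by omega] using h1 (i+1)
    | succ c =>
      have := (h2 (i+1) (i+c+1+1) (by unfold doneJ; omega)).1
      simpa [show i+c+1+1-(i+1) = c+1 by omega] using this
  -- evaluate the four sequential updates
  simp only [innerBodyA]
  set j := i + d + 1 with hjdef
  have hne_ij_ji : ¬(i = j ∧ j = i) := by omega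
  set F1 := updF st.1 i j (st.1 i (j-1)) (X.getD j 0 - X.getD (j-1) 0) (A.getD j 0) with hF1
  set F2 := updF F1 i j (F1 (j-1) i) (X.getD j 0 - X.getD i 0) (A.getD j 0) with hF2
  set F3 := updF F2 j i (F2 j (i+1)) (X.getD (i+1) 0 - X.getD i 0) (A.getD i 0) with hF3
  set F4 := updF F3 j i (F3 (i+1) j) (X.getD j 0 - X.getD i 0) (A.getD i 0) with hF4
  have oth1 : ∀ a b : Nat, ¬(a = i ∧ b = j) → F1 a b = st.1 a b := fun a b hne => updF_ne _ _ _ _ _ _ _ _ hne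
  have oth2 : ∀ a b : Nat, ¬(a = i ∧ b = j) → F2 a b = st.1 a b := by
    intro a b hne; rw [hF2, updF_ne _ _ _ _ _ _ _ _ hne]; exact oth1 a b hne
  have oth3 : ∀ a b : Nat, ¬(a = i ∧ b = j) → ¬(a = j ∧ b = i) → F3 a b = st.1 a b := by
    intro a b hne hne'; rw [hF3, updF_ne _ _ _ _ _ _ _ _ hne']; exact oth2 a b hne
  have oth4 : ∀ a b : Nat, ¬(a = i ∧ b = j) → ¬(a = j ∧ b = i) → F4 a b = st.1 a b := by
    intro a b hne hne'; rw [hF4, updF_ne _ _ _ _ _ _ _ _ hne']; exact oth3 a b hne hne'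
  have hj1 : j - 1 = i + d := by omega
  have eij : F4 i j = (fgB A X (d+1) i).1 := by
    rw [hF4, updF_ne _ _ _ _ _ _ _ _ hne_ij_ji, hF3, updF_ne _ _ _ _ _ _ _ _ hne_ij_ji,
        hF2, updF_at, oth1 (j-1) i (by omega), hF1, updF_at]
    rw [vij, hj1, rp1, rp2]
    simp [fgB, updB, hjdef]
  have eji : F4 j i = (fgB A X (d+1) i).2 := by
    rw [hF4, updF_at, oth3 (i+1) j (by omega) (by omega), hF3, updF_at,
        oth2 j (i+1) (by omega), oth2 j i (by omega)]
    rw [vji, rq1, rq2]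
    simp [fgB, updB, hjdef]
  -- now check every clause of the invariant
  have hmono : ∀ lo hi : Nat, doneJ N i (i+d) lo hi → doneJ N i j lo hi := by
    intro lo hi hd; unfold doneJ at hd ⊢; omega
  refine ⟨?_, ?_, ?_, ?_, ?_, ?_⟩
  · intro a
    show F4 a a = _
    rw [oth4 a a (by omega) (by omega)]; exact h1 a
  · intro lo hi hd
    show F4 lo hi = _ ∧ F4 hi lo = _
    by_cases hpair : lo = i ∧ hi = j
    · rw [hpair.1, hpair.2, show j - i = d + 1 from by omega]
      exact ⟨eij, eji⟩
    · have hd' : doneJ N i (i+d) lo hi := by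
        unfold doneJ at hd ⊢; omega
      have hne1 : ¬(lo = i ∧ hi = j) := hpair
      have hne2 : ¬(lo = j ∧ hi = i) := by
        unfold doneJ at hd; omega
      rw [oth4 lo hi hne1 hne2,
          oth4 hi lo (by unfold doneJ at hd; omega) (fun hc => hpair ⟨hc.2, hc.1⟩)]
      exact h2 lo hi hd'
  · intro a b hab hnd
    show F4 a b = -1
    have hnij : ¬(a = i ∧ b = j) := by
      intro hab2; apply hnd
      rw [hab2.1, hab2.2, show min i j = i from by omega, show max i j = j from by omega]
      unfold doneJ; omega
    have hnji : ¬(a = j ∧ b = i) := by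
      intro hab2; apply hnd
      rw [hab2.1, hab2.2, show min j i = i from by omega, show max j i = j from by omega]
      unfold doneJ; omega
    rw [oth4 a b hnij hnji]
    exact h3 a b hab (fun hd => hnd (hmono _ _ hd))
  · show (if F4 i j ≥ 0 ∨ F4 j i ≥ 0 then max st.2 ((j:Int) - (i:Int) + 1) else st.2) = 1 ∨ _
    by_cases hr : F4 i j ≥ 0 ∨ F4 j i ≥ 0
    · rw [if_pos hr]
      right
      rcases max_choice st.2 ((j:Int) - (i:Int) + 1) with hmx | hmx
      · rcases h4 with h1' | ⟨lo, hi, hd, hrr, he⟩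
        · exfalso
          have hle : ((j:Int) - (i:Int) + 1) ≤ st.2 := max_eq_left_iff.mp hmx
          omega
        · exact ⟨lo, hi, hmono _ _ hd, hrr, by rw [hmx]; exact he⟩
      · refine ⟨i, j, by unfold doneJ; omega, ?_, hmx⟩
        rw [show j - i = d + 1 from by omega]
        unfold reachB
        rw [← eij, ← eji]; exact hr
    · rw [if_neg hr]
      rcases h4 with h1' | ⟨lo, hi, hd, hrr, he⟩
      · exact Or.inl h1'
      · exact Or.inr ⟨lo, hi, hmono _ _ hd, hrr, he⟩
  · intro lo hi hd hrr
    show ((hi:Int) - (lo:Int) + 1) ≤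
      (if F4 i j ≥ 0 ∨ F4 j i ≥ 0 then max st.2 ((j:Int) - (i:Int) + 1) else st.2)
    by_cases hpair : lo = i ∧ hi = j
    · have hrr' : reachB A X (d+1) i := by
        rw [hpair.1, hpair.2, show j - i = d + 1 from by omega] at hrr; exact hrr
      have hcond : F4 i j ≥ 0 ∨ F4 j i ≥ 0 := by
        unfold reachB at hrr'; rw [eij, eji]; exact hrr'
      rw [if_pos hcond, hpair.1, hpair.2]
      exact le_max_right _ _
    · have hd' : doneJ N i (i+d) lo hi := by unfold doneJ at hd ⊢; omega
      have hle := h5 lo hi hd' hrr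
      split
      · exact le_trans hle (le_max_left _ _)
      · exact hle
  · show (1:Int) ≤ (if F4 i j ≥ 0 ∨ F4 j i ≥ 0 then max st.2 ((j:Int) - (i:Int) + 1) else st.2)
    split
    · exact le_trans h6 (le_max_left _ _)
    · exact h6

lemma innerFoldA (A X : List Int) (i : Nat) : ∀ (cnt js : Nat) (st : (Nat → Nat → Int) × Int),
    i + 1 ≤ js → js + cnt ≤ A.length → InvA A X (doneJ A.length i (js-1)) st →
    InvA A X (doneJ A.length i (js-1+cnt)) ((List.range' js cnt).foldl (innerBodyA A X i) st) := by
  intro cnt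
  induction cnt with
  | zero => intro js st _ _ h; simpa using h
  | succ c ih =>
    intro js st hjs hle h
    obtain ⟨d, rfl⟩ : ∃ d, js = i + d + 1 := ⟨js - i - 1, by omega⟩
    rw [List.range'_succ]
    simp only [List.foldl_cons]
    have hstep := stepA A X i d (by omega) st (by simpa [show i+d+1-1 = i+d by omega] using h)
    have := ih (i+d+1+1) _ (by omega) (by omega)
      (by simpa [show i+d+1+1-1 = i+d+1 by omega] using hstep)
    apply InvA_iff (d1 := doneJ A.length i (i+d+1+1-1+c)) (fun lo hi => by
      unfold doneJ; omega)
    exact this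

lemma outerFoldA (A X : List Int) : ∀ (m : Nat) (st : (Nat → Nat → Int) × Int),
    m < A.length → InvA A X (doneO A.length m) st →
    InvA A X (doneO A.length 0) (((List.range' 0 m).reverse).foldl (outerBodyA A X) st) := by
  intro m
  induction m with
  | zero =>
    intro st _ h
    simpa using InvA_iff (fun lo hi => by unfold doneO; omega) h
  | succ k ih =>
    intro st hm h
    rw [show List.range' 0 (k+1) = List.range' 0 k ++ [k] from by
          simp [List.range'_concat], List.reverse_append]
    simp only [List.reverse_cons, List.reverse_nil, List.nil_append, List.singleton_append,
      List.foldl_cons]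
    apply ih _ (by omega)
    -- one outer iteration at i = k
    have hpre : InvA A X (doneJ A.length k (k+1-1)) st := by
      apply InvA_iff (d1 := doneO A.length (k+1)) (fun lo hi => by
        unfold doneO doneJ; omega) h
    have := innerFoldA A X k (A.length - k - 1) (k+1) st (by omega) (by omega) hpre
    unfold outerBodyA
    apply InvA_iff (d1 := doneJ A.length k (k+1-1+(A.length - k - 1))) (fun lo hi => by
      unfold doneO doneJ; omega)
    exact this

-- membership in B's flat candidate list
lemma memB (A X : List Int) (x : Int) :
    (x ∈ (List.range' 1 (A.length-1)).flatMap (fun d =>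
      (List.range (A.length - d)).filterMap (fun i =>
        if max (fgB A X d i).1 (fgB A X d i).2 ≥ 0 then some ((d:Int) + 1) else none))) ↔
    ∃ d i : Nat, 1 ≤ d ∧ i + d < A.length ∧ reachB A X d i ∧ x = (d:Int) + 1 := by
  simp only [List.mem_flatMap, List.mem_filterMap, List.mem_range'_1, List.mem_range,
    reachB, ← le_max_iff]
  constructor
  · rintro ⟨d, ⟨hd1, hd2⟩, i, hi, hx⟩
    split at hx
    · exact ⟨d, i, hd1, by omega, by assumption, by simpa using hx.symm⟩
    · simp at hx
  · rintro ⟨d, i, hd1, hdi, hr, rfl⟩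
    exact ⟨d, ⟨hd1, by omega⟩, i, by omega, by simp [hr]⟩

-- ===== VERDICT (by name: the statement is the Claim_ definition above) =====
theorem refueling_spec : Claim_equal_refueling := by
  unfold Claim_equal_refueling
  intro A X _ _
  unfold Spec_refueling
  rcases Nat.eq_zero_or_pos A.length with hN | hN
  · simp [refueling, refueling_alt, hN]
  -- run the invariant over A's loops
  have hinit : InvA A X (doneO A.length (A.length - 1))
      ((fun a b => if a = b ∧ a < A.length then A.getD a 0 else -1), (1:Int)) := by
    refine ⟨fun a => by simp, ?_, ?_, Or.inl rfl, ?_, le_refl 1⟩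
    · intro lo hi hd; unfold doneO at hd; omega
    · intro a b hab _; simp [hab]
    · intro lo hi hd; unfold doneO at hd; omega
  have hfin := outerFoldA A X (A.length - 1) _ (by omega) hinit
  obtain ⟨_, _, _, c4, c5, c6⟩ := hfin
  -- refueling A X is the R component of the final state
  show (((List.range' 0 (A.length-1)).reverse).foldl (outerBodyA A X)
      ((fun a b => if a = b ∧ a < A.length then A.getD a 0 else -1), (1:Int))).2 = _
  set stF := ((List.range' 0 (A.length-1)).reverse).foldl (outerBodyA A X)
      ((fun a b => if a = b ∧ a < A.length then A.getD a 0 else -1), (1:Int)) with hstF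
  -- B's value
  set lst := (List.range' 1 (A.length-1)).flatMap (fun d =>
    (List.range (A.length - d)).filterMap (fun i =>
      if max (fgB A X d i).1 (fgB A X d i).2 ≥ 0 then some ((d:Int) + 1) else none)) with hlst
  show stF.2 = lst.foldl max 1
  have hB := PySem.List.le_foldl_max lst (1:Int)
  apply le_antisymm
  · rcases c4 with h1 | ⟨lo, hi, hd, hr, he⟩
    · rw [h1]; exact hB.1
    · have hmem : ((hi:Int) - lo + 1) ∈ lst := by
        rw [hlst, memB]
        refine ⟨hi - lo, lo, by unfold doneO at hd; omega,
          by unfold doneO at hd; omega, hr, ?_⟩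
        simp only [doneO] at hd
        push_cast [Nat.cast_sub (le_of_lt hd.1)]
        ring
      rw [he]; exact hB.2 _ hmem
  · rcases PySem.List.foldl_max_mem lst (1:Int) with h1 | hmem
    · rw [h1]; exact c6
    · rw [hlst, memB] at hmem
      obtain ⟨d, i, hd1, hdi, hr, hx⟩ := hmem
      rw [hx]
      have hdon : doneO A.length 0 i (i + d) := by unfold doneO; omega
      have := c5 i (i+d) hdon (by simpa [show i+d-i = d by omega] using hr)
      push_cast at this ⊢
      omega
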